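-- pv_equiv track=rewrite | github.com/TianxingChang/Kairos | backend/core/plan/scraping/services/content_processor.py | _extract_markdown_quotes
-- ===== SOURCE A (Python) =====
-- from typing import Dict, List, Any, Optional, Tuple, Union
--
-- def _extract_markdown_quotes(content: str) -> List[str]:
--     """Extract blockquotes from markdown content."""
--     quotes = []
--
--     # Find blockquote sections
--     lines = content.split('\n')
--     current_quote = []
--
--     for line in lines:
--         if line.strip().startswith('>'):
--             # Remove > and leading whitespace
--             quote_line = line.strip()[1:].strip()
--             current_quote.append(quote_line)
--         else:
--             if current_quote:
--                 # End of quote block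
--                 quote_text = ' '.join(current_quote).strip()
--                 if quote_text:
--                     quotes.append(quote_text)
--                 current_quote = []
--
--     # Handle quote at end of content
--     if current_quote:
--         quote_text = ' '.join(current_quote).strip()
--         if quote_text:
--             quotes.append(quote_text)
--
--     return quotes
-- ===== SOURCE B (Python) =====
-- from typing import List
--
-- def _extract_markdown_quotes(content: str) -> List[str]:
--     """Extract blockquotes from markdown content (block-scan re-implementation)."""
--     lines = content.split('\n')
--     quotes: List[str] = []
--     i, n = 0, len(lines)
--     while i < n:
--         if lines[i].strip().startswith('>'):
--             j = i + 1
--             while j < n and lines[j].strip().startswith('>'):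
--                 j += 1
--             text = ' '.join(l.strip()[1:].strip() for l in lines[i:j]).strip()
--             if text:
--                 quotes.append(text)
--             i = j
--         else:
--             i += 1
--     return quotes
-- ===== Notes on version B (the rewrite author's own statement) =====
-- stated objective: alternative
-- what changed: Replaces A's accumulator loop with its duplicated end-of-block/end-of-content flush by an index-based block scan that finds each consecutive run of blockquote lines and emits its joined text in one place.
import Mathlib
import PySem

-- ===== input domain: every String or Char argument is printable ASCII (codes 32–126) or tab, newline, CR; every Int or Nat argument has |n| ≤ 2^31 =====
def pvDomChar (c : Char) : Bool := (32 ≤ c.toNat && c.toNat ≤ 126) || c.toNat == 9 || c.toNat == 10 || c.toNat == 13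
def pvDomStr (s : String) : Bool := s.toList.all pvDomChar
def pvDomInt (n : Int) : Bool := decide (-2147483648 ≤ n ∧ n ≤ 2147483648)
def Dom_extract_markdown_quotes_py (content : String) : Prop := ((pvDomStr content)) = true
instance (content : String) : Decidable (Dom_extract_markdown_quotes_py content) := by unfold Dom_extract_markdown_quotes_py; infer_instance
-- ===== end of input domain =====

-- B replaces A's accumulator loop (with its duplicated flush) by an index-based scan over
-- consecutive runs of '>' lines; objective: alternative decomposition, same cost.

-- content.split('\n')  (sep is the non-empty literal '\n', so Python's split cannot raise)
def pvLines (content : String) : List String :=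
  (PySem.Chars.splitOn content.toList "\n".toList).map String.ofList

-- shared per-line primitives (the same Python expressions occur verbatim in both programs)
-- line.strip().startswith('>')
def pvIsQ (line : String) : Bool := PySem.Str.startswith (PySem.Str.strip line) ">"
-- line.strip()[1:].strip()
def pvTrans (line : String) : String :=
  PySem.Str.strip (PySem.Str.slice (PySem.Str.strip line) (some 1) none)

-- ===== PORT A =====
-- the flush A performs both in the else-branch and after the loop
def pvFlushA (quotes cur : List String) : List String :=
  if cur = [] then quotes
  else
    let t := PySem.Str.strip (PySem.Str.join " " cur)
    if t = "" then quotes else quotes ++ [t]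

def extract_markdown_quotes_py (content : String) : List String :=
  let lines := pvLines content
  let st := lines.foldl
    (fun (st : List String × List String) line =>
      if pvIsQ line then (st.1, st.2 ++ [pvTrans line])
      else (pvFlushA st.1 st.2, []))
    ([], [])
  pvFlushA st.1 st.2

-- ===== PORT B =====
-- the while-loop of Source B: skip non-quote lines; at a quote line take the whole run,
-- emit its joined text if non-empty, continue after the run
def pvBlocks : List String → List String
  | [] => []
  | l :: rest =>
    if pvIsQ l then
      let blk := l :: rest.takeWhile pvIsQ
      let t := PySem.Str.strip (PySem.Str.join " " (blk.map pvTrans))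
      (if t = "" then [] else [t]) ++ pvBlocks (rest.dropWhile pvIsQ)
    else pvBlocks rest
termination_by lines => lines.length
decreasing_by
  · have := List.length_dropWhile_le pvIsQ rest; simp; omega
  · simp

def extract_markdown_quotes_py_alt (content : String) : List String :=
  pvBlocks (pvLines content)

-- ===== PRECONDITION & SPEC =====
def Spec_extract_markdown_quotes_py (content : String) (out : List String) : Prop := out = extract_markdown_quotes_py_alt content
instance (content : String) (out : List String) : Decidable (Spec_extract_markdown_quotes_py content out) := by unfold Spec_extract_markdown_quotes_py; infer_instance

-- ===== CLAIM (what is proved, stated in full; the proofs are below) =====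
def Claim_equal_extract_markdown_quotes_py : Prop := ∀ (content : String), Dom_extract_markdown_quotes_py content → Spec_extract_markdown_quotes_py content (extract_markdown_quotes_py content)

-- ===== LEMMAS AND PROOFS =====

-- what a flush contributes, independent of the quotes already collected
def pvFlushList (cur : List String) : List String :=
  let t := PySem.Str.strip (PySem.Str.join " " cur)
  if t = "" then [] else [t]

lemma pvFlushA_eq (quotes cur : List String) :
    pvFlushA quotes cur = quotes ++ pvFlushList cur := by
  have hfl : pvFlushList [] = [] := by decide
  cases cur with
  | nil => simp [pvFlushA, hfl]
  | cons x xs =>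
    simp only [pvFlushA, pvFlushList, reduceCtorEq, if_false]
    split <;> simp

-- A's remaining output given a pending block `cur` and remaining lines
def pvEmit : List String → List String → List String
  | cur, [] => pvFlushList cur
  | cur, l :: rest =>
    if pvIsQ l then pvEmit (cur ++ [pvTrans l]) rest
    else pvFlushList cur ++ pvEmit [] rest

lemma pvFoldA_eq (lines : List String) : ∀ (quotes cur : List String),
    (let st := lines.foldl
      (fun (st : List String × List String) line =>
        if pvIsQ line then (st.1, st.2 ++ [pvTrans line])
        else (pvFlushA st.1 st.2, []))
      (quotes, cur)
     pvFlushA st.1 st.2) = quotes ++ pvEmit cur lines := by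
  induction lines with
  | nil => intro quotes cur; simpa [pvEmit] using pvFlushA_eq quotes cur
  | cons l rest ih =>
    intro quotes cur
    by_cases h : pvIsQ l
    · simp only [List.foldl_cons, h, reduceIte, pvEmit]
      exact ih quotes (cur ++ [pvTrans l])
    · simp only [List.foldl_cons, h, Bool.false_eq_true, if_false, pvEmit]
      rw [ih (pvFlushA quotes cur) [], pvFlushA_eq, List.append_assoc]

-- one-step block characterisation of pvBlocks
lemma pvBlocks_step (lines : List String) :
    pvBlocks lines =
      pvFlushList ((lines.takeWhile pvIsQ).map pvTrans) ++ pvBlocks (lines.dropWhile pvIsQ) := by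
  cases lines with
  | nil =>
    have hfl : pvFlushList [] = [] := by decide
    simp [pvBlocks, hfl]
  | cons l rest =>
    by_cases h : pvIsQ l
    · simp only [pvBlocks, h, reduceIte, List.takeWhile_cons, List.dropWhile_cons, pvFlushList]
    · have hfl : pvFlushList [] = [] := by decide
      simp [pvBlocks, h, hfl]

lemma pvEmit_eq (lines : List String) : ∀ (cur : List String),
    pvEmit cur lines =
      pvFlushList (cur ++ (lines.takeWhile pvIsQ).map pvTrans) ++ pvBlocks (lines.dropWhile pvIsQ) := by
  induction lines with
  | nil => intro cur; simp [pvEmit, pvBlocks]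
  | cons l rest ih =>
    intro cur
    by_cases h : pvIsQ l
    · simp only [pvEmit, h, reduceIte, List.takeWhile_cons, List.dropWhile_cons, ih]
      simp
    · simp only [pvEmit, h, Bool.false_eq_true, if_false, List.takeWhile_cons, List.dropWhile_cons]
      have hlr : pvBlocks (l :: rest) = pvBlocks rest := by simp [pvBlocks, h]
      rw [ih [], hlr, pvBlocks_step rest]
      simp

-- ===== VERDICT (by name: the statement is the Claim_ definition above) =====
theorem extract_markdown_quotes_py_spec : Claim_equal_extract_markdown_quotes_py := by
  intro content _
  unfold Spec_extract_markdown_quotes_py extract_markdown_quotes_py extract_markdown_quotes_py_alt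
  rw [pvFoldA_eq, pvEmit_eq]
  simp [← pvBlocks_step]
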